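-- pv_equiv track=rewrite | github.com/zkily/arai_emaps | backend/app/modules/database/api.py | _compute_actual_plan_trend_updates
-- ===== SOURCE A (Python) =====
-- from typing import Optional
--
-- TREND_PREFIXES = ["cutting", "chamfering", "molding", "plating", "welding", "inspection"]
--
-- INVENTORY_PROCESS_CONFIG = [
--     {"key": "cutting", "keywords": ["切断"], "fields": {"carry": "cutting_carry_over", "actual": "cutting_actual", "defect": "cutting_defect", "scrap": "cutting_scrap", "onHold": "cutting_on_hold", "inventory": "cutting_inventory", "trend": "cutting_trend"}},
--     {"key": "chamfering", "keywords": ["面取"], "fields": {"carry": "chamfering_carry_over", "actual": "chamfering_actual", "defect": "chamfering_defect", "scrap": "chamfering_scrap", "onHold": "chamfering_on_hold", "inventory": "chamfering_inventory", "trend": "chamfering_trend"}},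
--     {"key": "molding", "keywords": ["成型"], "fields": {"carry": "molding_carry_over", "actual": "molding_actual", "defect": "molding_defect", "scrap": "molding_scrap", "onHold": "molding_on_hold", "inventory": "molding_inventory", "trend": "molding_trend"}},
--     {"key": "plating", "keywords": ["メッキ"], "fields": {"carry": "plating_carry_over", "actual": "plating_actual", "defect": "plating_defect", "scrap": "plating_scrap", "onHold": "plating_on_hold", "inventory": "plating_inventory", "trend": "plating_trend"}},
--     {"key": "welding", "keywords": ["溶接"], "fields": {"carry": "welding_carry_over", "actual": "welding_actual", "defect": "welding_defect", "scrap": "welding_scrap", "onHold": "welding_on_hold", "inventory": "welding_inventory", "trend": "welding_trend"}},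
--     {"key": "inspection", "keywords": ["検査"], "fields": {"carry": "inspection_carry_over", "actual": "inspection_actual", "defect": "inspection_defect", "scrap": "inspection_scrap", "onHold": "inspection_on_hold", "inventory": "inspection_inventory", "trend": "inspection_trend"}},
--     {"key": "warehouse", "keywords": ["倉庫"], "fields": {"carry": "warehouse_carry_over", "actual": "warehouse_actual", "scrap": "warehouse_scrap", "onHold": "warehouse_on_hold", "inventory": "warehouse_inventory", "trend": "warehouse_trend"}},
--     {"key": "outsourced_warehouse", "keywords": ["外注倉庫", "外注倉"], "fields": {"carry": "outsourced_warehouse_carry_over", "actual": "outsourced_warehouse_actual", "scrap": "outsourced_warehouse_scrap", "onHold": "outsourced_warehouse_on_hold", "inventory": "outsourced_warehouse_inventory", "trend": "outsourced_warehouse_trend"}},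
--     {"key": "outsourced_plating", "keywords": ["外注メッキ"], "fields": {"carry": "outsourced_plating_carry_over", "actual": "outsourced_plating_actual", "defect": "outsourced_plating_defect", "scrap": "outsourced_plating_scrap", "onHold": "outsourced_plating_on_hold", "inventory": "outsourced_plating_inventory", "trend": "outsourced_plating_trend"}},
--     {"key": "outsourced_welding", "keywords": ["外注溶接"], "fields": {"carry": "outsourced_welding_carry_over", "actual": "outsourced_welding_actual", "defect": "outsourced_welding_defect", "scrap": "outsourced_welding_scrap", "onHold": "outsourced_welding_on_hold", "inventory": "outsourced_welding_inventory", "trend": "outsourced_welding_trend"}},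
--     {"key": "pre_welding_inspection", "keywords": ["溶接前検査"], "fields": {"carry": "pre_welding_inspection_carry_over", "actual": "pre_welding_inspection_actual", "defect": "pre_welding_inspection_defect", "scrap": "pre_welding_inspection_scrap", "onHold": "pre_welding_inspection_on_hold", "inventory": "pre_welding_inspection_inventory", "trend": "pre_welding_inspection_trend"}},
--     {"key": "pre_inspection", "keywords": ["外注支給前"], "fields": {"carry": "pre_inspection_carry_over", "actual": "pre_inspection_actual", "scrap": "pre_inspection_scrap", "inventory": "pre_inspection_inventory", "trend": "pre_inspection_trend"}},
--     {"key": "pre_outsourcing", "keywords": ["外注検査前"], "fields": {"carry": "pre_outsourcing_carry_over", "actual": "pre_outsourcing_actual", "scrap": "pre_outsourcing_scrap", "inventory": "pre_outsourcing_inventory", "trend": "pre_outsourcing_trend"}},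
-- ]
--
-- def _get_process_config_by_key(key: str) -> Optional[dict]:
--     """INVENTORY_PROCESS_CONFIG から key で設定を取得"""
--     for c in INVENTORY_PROCESS_CONFIG:
--         if c["key"] == key:
--             return c
--     return None
--
-- def _num(row: dict, key: str) -> int:
--     if key not in row or row[key] is None:
--         return 0
--     try:
--         return int(row[key])
--     except (TypeError, ValueError):
--         return 0
--
-- def _compute_actual_plan_trend_updates(row: dict, sequence: list) -> dict:
--     """上と同式だが *_actual_plan を使用。cutting/chamfering/molding/plating/welding/inspection の 6 工程のみ。"""
--     updates = {}
--     forecast = _num(row, "forecast_quantity")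
--     for key in TREND_PREFIXES:
--         if key not in sequence:
--             continue
--         config = _get_process_config_by_key(key)
--         if not config:
--             continue
--         fields = config.get("fields", {})
--         trend_field = f"{key}_actual_plan_trend"
--         carry = _num(row, fields.get("carry", ""))
--         if fields.get("actual"):
--             ap_col = fields["actual"].replace("_actual", "_actual_plan")
--             actual_plan = _num(row, ap_col)
--         else:
--             actual_plan = 0
--         defect = _num(row, fields.get("defect", "")) if fields.get("defect") else 0
--         scrap = _num(row, fields.get("scrap", "")) if fields.get("scrap") else 0
--         on_hold = _num(row, fields.get("onHold", "")) if fields.get("onHold") else 0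
--         idx = sequence.index(key) if key in sequence else -1
--         sub_carry = sub_defect = sub_scrap = sub_on_hold = 0
--         if idx >= 0:
--             for j in range(idx + 1, len(sequence)):
--                 nc = _get_process_config_by_key(sequence[j])
--                 if nc and nc.get("fields"):
--                     f = nc["fields"]
--                     if f.get("carry"):
--                         sub_carry += _num(row, f["carry"])
--                     if f.get("defect"):
--                         sub_defect += _num(row, f["defect"])
--                     if f.get("scrap"):
--                         sub_scrap += _num(row, f["scrap"])
--                     if f.get("onHold"):
--                         sub_on_hold += _num(row, f["onHold"])
--         trend = carry + sub_carry + actual_plan - defect - scrap - on_hold - forecast - sub_defect - sub_scrap - sub_on_hold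
--         updates[trend_field] = trend
--     return updates
-- ===== SOURCE B (Python) =====
-- # B: one reverse pass builds suffix sums and a first-occurrence map at once;
-- # per-process columns come from a flat tuple table / the key pattern, instead of
-- # A's per-key rescans of the tail of `sequence` with a linear scan of
-- # INVENTORY_PROCESS_CONFIG per element.
--
-- TREND_PREFIXES = ["cutting", "chamfering", "molding", "plating", "welding", "inspection"]
--
-- # key -> (carry, defect-or-None, scrap, onHold-or-None) columns, from INVENTORY_PROCESS_CONFIG
-- _SUB_COLS = {
--     "cutting": ("cutting_carry_over", "cutting_defect", "cutting_scrap", "cutting_on_hold"),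
--     "chamfering": ("chamfering_carry_over", "chamfering_defect", "chamfering_scrap", "chamfering_on_hold"),
--     "molding": ("molding_carry_over", "molding_defect", "molding_scrap", "molding_on_hold"),
--     "plating": ("plating_carry_over", "plating_defect", "plating_scrap", "plating_on_hold"),
--     "welding": ("welding_carry_over", "welding_defect", "welding_scrap", "welding_on_hold"),
--     "inspection": ("inspection_carry_over", "inspection_defect", "inspection_scrap", "inspection_on_hold"),
--     "warehouse": ("warehouse_carry_over", None, "warehouse_scrap", "warehouse_on_hold"),
--     "outsourced_warehouse": ("outsourced_warehouse_carry_over", None, "outsourced_warehouse_scrap", "outsourced_warehouse_on_hold"),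
--     "outsourced_plating": ("outsourced_plating_carry_over", "outsourced_plating_defect", "outsourced_plating_scrap", "outsourced_plating_on_hold"),
--     "outsourced_welding": ("outsourced_welding_carry_over", "outsourced_welding_defect", "outsourced_welding_scrap", "outsourced_welding_on_hold"),
--     "pre_welding_inspection": ("pre_welding_inspection_carry_over", "pre_welding_inspection_defect", "pre_welding_inspection_scrap", "pre_welding_inspection_on_hold"),
--     "pre_inspection": ("pre_inspection_carry_over", None, "pre_inspection_scrap", None),
--     "pre_outsourcing": ("pre_outsourcing_carry_over", None, "pre_outsourcing_scrap", None),
-- }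
--
-- def _get(row, key):
--     v = row.get(key)
--     if v is None:
--         return 0
--     try:
--         return int(v)
--     except (TypeError, ValueError):
--         return 0
--
-- def _compute_actual_plan_trend_updates(row: dict, sequence: list) -> dict:
--     forecast = _get(row, "forecast_quantity")
--     sc = sd = ss = so = 0
--     after = {}  # name -> suffix sums strictly after its first occurrence
--     for name in reversed(sequence):
--         after[name] = (sc, sd, ss, so)
--         cols = _SUB_COLS.get(name)
--         if cols is not None:
--             carry, defect, scrap, on_hold = cols
--             sc += _get(row, carry)
--             if defect is not None:
--                 sd += _get(row, defect)
--             ss += _get(row, scrap)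
--             if on_hold is not None:
--                 so += _get(row, on_hold)
--     updates = {}
--     for key in TREND_PREFIXES:
--         if key in after:
--             c, d, s, o = after[key]
--             updates[key + "_actual_plan_trend"] = (
--                 _get(row, key + "_carry_over") + c
--                 + _get(row, key + "_actual_plan")
--                 - _get(row, key + "_defect") - _get(row, key + "_scrap")
--                 - _get(row, key + "_on_hold")
--                 - forecast - d - s - o)
--     return updates
-- ===== Notes on version B (the rewrite author's own statement) =====
-- stated objective: alternative
-- what changed: One reverse pass over sequence builds running suffix contribution sums and a first-occurrence map at once, and a flat dict keyed by process replaces the per-element linear scans of INVENTORY_PROCESS_CONFIG; it trades A's six per-key rescans of the tail of sequence for a single pass with a dict insert per element.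
import Mathlib
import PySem

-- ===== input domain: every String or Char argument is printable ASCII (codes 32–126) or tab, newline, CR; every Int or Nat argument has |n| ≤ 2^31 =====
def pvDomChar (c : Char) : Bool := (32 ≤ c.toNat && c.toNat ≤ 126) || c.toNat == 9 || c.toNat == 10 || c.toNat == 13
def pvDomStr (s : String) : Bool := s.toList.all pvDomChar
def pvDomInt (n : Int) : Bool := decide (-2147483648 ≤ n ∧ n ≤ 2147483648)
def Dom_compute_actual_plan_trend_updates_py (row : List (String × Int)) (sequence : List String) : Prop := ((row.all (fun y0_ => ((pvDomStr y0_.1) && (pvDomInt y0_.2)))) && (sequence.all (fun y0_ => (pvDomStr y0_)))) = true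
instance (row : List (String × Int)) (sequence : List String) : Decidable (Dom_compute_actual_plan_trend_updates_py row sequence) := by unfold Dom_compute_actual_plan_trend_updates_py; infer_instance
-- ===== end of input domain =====

-- B replaces A's six rescans of the tail of `sequence` (each with a linear scan of
-- INVENTORY_PROCESS_CONFIG per element) by one reverse pass computing suffix sums and
-- a first-occurrence map, plus a flat dict of per-process columns; objective: alternative.

-- ===== PORT A =====

-- _num(row, key): row values are ints here, so int(row[key]) is row[key]; shared by both
-- ports because A's _num and B's _get are the same Python code.
def pyNum (row : List (String × Int)) (key : String) : Int :=
  (PySem.Dict.getD (PySem.Dict.mk row) key 0)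

def trendPrefixesA : List String :=
  ["cutting", "chamfering", "molding", "plating", "welding", "inspection"]

-- INVENTORY_PROCESS_CONFIG as (key, fields) pairs; the "keywords" entries are never
-- read by _compute_actual_plan_trend_updates and are omitted.
def inventoryProcessConfigA : List (String × List (String × String)) :=
  [("cutting", [("carry","cutting_carry_over"),("actual","cutting_actual"),("defect","cutting_defect"),("scrap","cutting_scrap"),("onHold","cutting_on_hold"),("inventory","cutting_inventory"),("trend","cutting_trend")]),
   ("chamfering", [("carry","chamfering_carry_over"),("actual","chamfering_actual"),("defect","chamfering_defect"),("scrap","chamfering_scrap"),("onHold","chamfering_on_hold"),("inventory","chamfering_inventory"),("trend","chamfering_trend")]),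
   ("molding", [("carry","molding_carry_over"),("actual","molding_actual"),("defect","molding_defect"),("scrap","molding_scrap"),("onHold","molding_on_hold"),("inventory","molding_inventory"),("trend","molding_trend")]),
   ("plating", [("carry","plating_carry_over"),("actual","plating_actual"),("defect","plating_defect"),("scrap","plating_scrap"),("onHold","plating_on_hold"),("inventory","plating_inventory"),("trend","plating_trend")]),
   ("welding", [("carry","welding_carry_over"),("actual","welding_actual"),("defect","welding_defect"),("scrap","welding_scrap"),("onHold","welding_on_hold"),("inventory","welding_inventory"),("trend","welding_trend")]),
   ("inspection", [("carry","inspection_carry_over"),("actual","inspection_actual"),("defect","inspection_defect"),("scrap","inspection_scrap"),("onHold","inspection_on_hold"),("inventory","inspection_inventory"),("trend","inspection_trend")]),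
   ("warehouse", [("carry","warehouse_carry_over"),("actual","warehouse_actual"),("scrap","warehouse_scrap"),("onHold","warehouse_on_hold"),("inventory","warehouse_inventory"),("trend","warehouse_trend")]),
   ("outsourced_warehouse", [("carry","outsourced_warehouse_carry_over"),("actual","outsourced_warehouse_actual"),("scrap","outsourced_warehouse_scrap"),("onHold","outsourced_warehouse_on_hold"),("inventory","outsourced_warehouse_inventory"),("trend","outsourced_warehouse_trend")]),
   ("outsourced_plating", [("carry","outsourced_plating_carry_over"),("actual","outsourced_plating_actual"),("defect","outsourced_plating_defect"),("scrap","outsourced_plating_scrap"),("onHold","outsourced_plating_on_hold"),("inventory","outsourced_plating_inventory"),("trend","outsourced_plating_trend")]),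
   ("outsourced_welding", [("carry","outsourced_welding_carry_over"),("actual","outsourced_welding_actual"),("defect","outsourced_welding_defect"),("scrap","outsourced_welding_scrap"),("onHold","outsourced_welding_on_hold"),("inventory","outsourced_welding_inventory"),("trend","outsourced_welding_trend")]),
   ("pre_welding_inspection", [("carry","pre_welding_inspection_carry_over"),("actual","pre_welding_inspection_actual"),("defect","pre_welding_inspection_defect"),("scrap","pre_welding_inspection_scrap"),("onHold","pre_welding_inspection_on_hold"),("inventory","pre_welding_inspection_inventory"),("trend","pre_welding_inspection_trend")]),
   ("pre_inspection", [("carry","pre_inspection_carry_over"),("actual","pre_inspection_actual"),("scrap","pre_inspection_scrap"),("inventory","pre_inspection_inventory"),("trend","pre_inspection_trend")]),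
   ("pre_outsourcing", [("carry","pre_outsourcing_carry_over"),("actual","pre_outsourcing_actual"),("scrap","pre_outsourcing_scrap"),("inventory","pre_outsourcing_inventory"),("trend","pre_outsourcing_trend")])]

-- _get_process_config_by_key: linear scan of the config list
def getCfgScanA : List (String × List (String × String)) → String → Option (List (String × String))
  | [], _ => none
  | c :: rest, key => if c.1 == key then some c.2 else getCfgScanA rest key

def getConfigByKeyA (key : String) : Option (List (String × String)) :=
  getCfgScanA inventoryProcessConfigA key

-- fields.get(k) / fields.get(k, d)
def fgetA : List (String × String) → String → Option String
  | [], _ => none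
  | p :: rest, k => if p.1 == k then some p.2 else fgetA rest k

-- body of A's inner loop over j in range(idx+1, len(sequence)); acc = (sub_carry, sub_defect, sub_scrap, sub_on_hold).
-- `if nc and nc.get("fields")` : our entries carry the fields dict directly, and every fields dict
-- is a nonempty literal (truthy), so the test is `nc` found; field values are nonempty strings, so
-- `if f.get(k):` is `fgetA f k = some c` with c ≠ "" (ported as the `== ""` test).
def stepSubA (row : List (String × Int)) (acc : Int × Int × Int × Int) (x : String) :
    Int × Int × Int × Int :=
  match getConfigByKeyA x with
  | none => acc
  | some f =>
    let sc := match fgetA f "carry" with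
      | some c => if c == "" then acc.1 else acc.1 + pyNum row c
      | none => acc.1
    let sd := match fgetA f "defect" with
      | some c => if c == "" then acc.2.1 else acc.2.1 + pyNum row c
      | none => acc.2.1
    let ss := match fgetA f "scrap" with
      | some c => if c == "" then acc.2.2.1 else acc.2.2.1 + pyNum row c
      | none => acc.2.2.1
    let so := match fgetA f "onHold" with
      | some c => if c == "" then acc.2.2.2 else acc.2.2.2 + pyNum row c
      | none => acc.2.2.2
    (sc, sd, ss, so)

-- one iteration of A's outer loop over TREND_PREFIXES
def outerStepA (row : List (String × Int)) (sequence : List String) (forecast : Int)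
    (updates : PySem.Dict String Int) (key : String) : PySem.Dict String Int :=
  if !(sequence.contains key) then updates
  else
    match getConfigByKeyA key with
    | none => updates
    | some fields =>
      let trend_field := key ++ "_actual_plan_trend"
      let carry := pyNum row ((fgetA fields "carry").getD "")
      let actual_plan := match fgetA fields "actual" with
        | some a => if a == "" then 0
                    else pyNum row (PySem.Str.replace a "_actual" "_actual_plan")
        | none => 0
      let defect := match fgetA fields "defect" with
        | some c => if c == "" then 0 else pyNum row c
        | none => 0
      let scrap := match fgetA fields "scrap" with
        | some c => if c == "" then 0 else pyNum row c
        | none => 0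
      let on_hold := match fgetA fields "onHold" with
        | some c => if c == "" then 0 else pyNum row c
        | none => 0
      let idx : Int := if sequence.contains key then
          (match PySem.List.index? sequence key with
           | some i => (i : Int)
           | none => -1)
        else -1
      let subs : Int × Int × Int × Int :=
        if 0 ≤ idx then
          (PySem.List.pyRange (idx + 1) (PySem.List.len sequence) 1).foldl
            (fun acc j => stepSubA row acc (PySem.List.pyGetD sequence j "")) (0, 0, 0, 0)
        else (0, 0, 0, 0)
      let trend := carry + subs.1 + actual_plan - defect - scrap - on_hold - forecast
                   - subs.2.1 - subs.2.2.1 - subs.2.2.2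
      updates.insert trend_field trend

def compute_actual_plan_trend_updates_py (row : List (String × Int)) (sequence : List String) :
    List (String × Int) :=
  (trendPrefixesA.foldl (outerStepA row sequence (pyNum row "forecast_quantity"))
    PySem.Dict.empty).items

-- ===== PORT B =====

def trendPrefixesB : List String :=
  ["cutting", "chamfering", "molding", "plating", "welding", "inspection"]

-- _SUB_COLS: key -> (carry, defect?, scrap, onHold?) columns
def subColsB : PySem.Dict String (String × Option String × String × Option String) :=
  PySem.Dict.mk
    [("cutting", ("cutting_carry_over", some "cutting_defect", "cutting_scrap", some "cutting_on_hold")),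
     ("chamfering", ("chamfering_carry_over", some "chamfering_defect", "chamfering_scrap", some "chamfering_on_hold")),
     ("molding", ("molding_carry_over", some "molding_defect", "molding_scrap", some "molding_on_hold")),
     ("plating", ("plating_carry_over", some "plating_defect", "plating_scrap", some "plating_on_hold")),
     ("welding", ("welding_carry_over", some "welding_defect", "welding_scrap", some "welding_on_hold")),
     ("inspection", ("inspection_carry_over", some "inspection_defect", "inspection_scrap", some "inspection_on_hold")),
     ("warehouse", ("warehouse_carry_over", none, "warehouse_scrap", some "warehouse_on_hold")),
     ("outsourced_warehouse", ("outsourced_warehouse_carry_over", none, "outsourced_warehouse_scrap", some "outsourced_warehouse_on_hold")),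
     ("outsourced_plating", ("outsourced_plating_carry_over", some "outsourced_plating_defect", "outsourced_plating_scrap", some "outsourced_plating_on_hold")),
     ("outsourced_welding", ("outsourced_welding_carry_over", some "outsourced_welding_defect", "outsourced_welding_scrap", some "outsourced_welding_on_hold")),
     ("pre_welding_inspection", ("pre_welding_inspection_carry_over", some "pre_welding_inspection_defect", "pre_welding_inspection_scrap", some "pre_welding_inspection_on_hold")),
     ("pre_inspection", ("pre_inspection_carry_over", none, "pre_inspection_scrap", none)),
     ("pre_outsourcing", ("pre_outsourcing_carry_over", none, "pre_outsourcing_scrap", none))]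

-- one iteration of B's reverse pass; state = (after-map, (sc, sd, ss, so))
def revStepB (row : List (String × Int))
    (st : PySem.Dict String (Int × Int × Int × Int) × (Int × Int × Int × Int))
    (name : String) :
    PySem.Dict String (Int × Int × Int × Int) × (Int × Int × Int × Int) :=
  let after := st.1.insert name st.2
  match subColsB.get? name with
  | none => (after, st.2)
  | some (carry, defect, scrap, on_hold) =>
    let sc := st.2.1 + pyNum row carry
    let sd := match defect with
      | some c => st.2.2.1 + pyNum row c
      | none => st.2.2.1
    let ss := st.2.2.2.1 + pyNum row scrap
    let so := match on_hold with
      | some c => st.2.2.2.2 + pyNum row c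
      | none => st.2.2.2.2
    (after, (sc, sd, ss, so))

-- one iteration of B's trend loop
def trendStepB (row : List (String × Int)) (forecast : Int)
    (after : PySem.Dict String (Int × Int × Int × Int))
    (updates : PySem.Dict String Int) (key : String) : PySem.Dict String Int :=
  match after.get? key with
  | none => updates
  | some (c, d, s, o) =>
    updates.insert (key ++ "_actual_plan_trend")
      (pyNum row (key ++ "_carry_over") + c + pyNum row (key ++ "_actual_plan")
       - pyNum row (key ++ "_defect") - pyNum row (key ++ "_scrap")
       - pyNum row (key ++ "_on_hold") - forecast - d - s - o)

def compute_actual_plan_trend_updates_py_alt (row : List (String × Int)) (sequence : List String) :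
    List (String × Int) :=
  let st := sequence.reverse.foldl (revStepB row) (PySem.Dict.empty, (0, 0, 0, 0))
  (trendPrefixesB.foldl (trendStepB row (pyNum row "forecast_quantity") st.1)
    PySem.Dict.empty).items

-- ===== PRECONDITION & SPEC =====
def Spec_compute_actual_plan_trend_updates_py (row : List (String × Int)) (sequence : List String) (out : List (String × Int)) : Prop := out = compute_actual_plan_trend_updates_py_alt row sequence
instance (row : List (String × Int)) (sequence : List String) (out : List (String × Int)) : Decidable (Spec_compute_actual_plan_trend_updates_py row sequence out) := by unfold Spec_compute_actual_plan_trend_updates_py; infer_instance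

-- ===== CLAIM (what is proved, stated in full; the proofs are below) =====
def Claim_equal_compute_actual_plan_trend_updates_py : Prop := ∀ (row : List (String × Int)) (sequence : List String), Dom_compute_actual_plan_trend_updates_py row sequence → Spec_compute_actual_plan_trend_updates_py row sequence (compute_actual_plan_trend_updates_py row sequence)

-- ===== LEMMAS AND PROOFS =====

-- componentwise sum of two 4-tuples
def vadd (a b : Int × Int × Int × Int) : Int × Int × Int × Int :=
  (a.1 + b.1, a.2.1 + b.2.1, a.2.2.1 + b.2.2.1, a.2.2.2 + b.2.2.2)

-- the (carry, defect, scrap, onHold) contribution of one sequence element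
def contrib (row : List (String × Int)) (x : String) : Int × Int × Int × Int :=
  match subColsB.get? x with
  | none => (0, 0, 0, 0)
  | some (carry, defect, scrap, on_hold) =>
    (pyNum row carry,
     (match defect with | some c => pyNum row c | none => 0),
     pyNum row scrap,
     (match on_hold with | some c => pyNum row c | none => 0))

-- total contribution of a list of elements
def total (row : List (String × Int)) : List String → Int × Int × Int × Int
  | [] => (0, 0, 0, 0)
  | x :: l => vadd (contrib row x) (total row l)

theorem vadd4_zero_right (a : Int × Int × Int × Int) : vadd a (0, 0, 0, 0) = a := by
  simp [vadd]

theorem vadd4_zero_left (a : Int × Int × Int × Int) : vadd (0, 0, 0, 0) a = a := by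
  simp [vadd]

theorem vadd4_comm (a b : Int × Int × Int × Int) : vadd a b = vadd b a := by
  simp [vadd]; omega

theorem vadd4_assoc (a b c : Int × Int × Int × Int) :
    vadd (vadd a b) c = vadd a (vadd b c) := by
  simp [vadd]; omega

theorem stepSubA_eq (row : List (String × Int)) (acc : Int × Int × Int × Int) (x : String) :
    stepSubA row acc x = vadd acc (contrib row x) := by
  by_cases h1 : x = "cutting"
  · subst h1; rfl
  by_cases h2 : x = "chamfering"
  · subst h2; rfl
  by_cases h3 : x = "molding"
  · subst h3; rfl
  by_cases h4 : x = "plating"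
  · subst h4; rfl
  by_cases h5 : x = "welding"
  · subst h5; rfl
  by_cases h6 : x = "inspection"
  · subst h6; rfl
  by_cases h7 : x = "warehouse"
  · subst h7; simp [stepSubA, contrib, vadd, getConfigByKeyA, getCfgScanA, inventoryProcessConfigA, fgetA, subColsB, PySem.Dict.get?_mk_cons]
  by_cases h8 : x = "outsourced_warehouse"
  · subst h8; simp [stepSubA, contrib, vadd, getConfigByKeyA, getCfgScanA, inventoryProcessConfigA, fgetA, subColsB, PySem.Dict.get?_mk_cons]
  by_cases h9 : x = "outsourced_plating"
  · subst h9; rfl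
  by_cases h10 : x = "outsourced_welding"
  · subst h10; rfl
  by_cases h11 : x = "pre_welding_inspection"
  · subst h11; rfl
  by_cases h12 : x = "pre_inspection"
  · subst h12; simp [stepSubA, contrib, vadd, getConfigByKeyA, getCfgScanA, inventoryProcessConfigA, fgetA, subColsB, PySem.Dict.get?_mk_cons]
  by_cases h13 : x = "pre_outsourcing"
  · subst h13; simp [stepSubA, contrib, vadd, getConfigByKeyA, getCfgScanA, inventoryProcessConfigA, fgetA, subColsB, PySem.Dict.get?_mk_cons]
  have hA : getConfigByKeyA x = none := by
    simp [getConfigByKeyA, getCfgScanA, inventoryProcessConfigA, beq_iff_eq,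
      Ne.symm h1, Ne.symm h2, Ne.symm h3, Ne.symm h4, Ne.symm h5, Ne.symm h6, Ne.symm h7,
      Ne.symm h8, Ne.symm h9, Ne.symm h10, Ne.symm h11, Ne.symm h12, Ne.symm h13]
  have hB : subColsB.get? x = none := by
    simp [subColsB, PySem.Dict.get?_mk_cons, beq_iff_eq,
      Ne.symm h1, Ne.symm h2, Ne.symm h3, Ne.symm h4, Ne.symm h5, Ne.symm h6, Ne.symm h7,
      Ne.symm h8, Ne.symm h9, Ne.symm h10, Ne.symm h11, Ne.symm h12, Ne.symm h13];
    rfl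
  rw [stepSubA, hA, contrib, hB, vadd4_zero_right]

theorem foldl_stepSubA (row : List (String × Int)) (l : List String)
    (acc : Int × Int × Int × Int) :
    l.foldl (stepSubA row) acc = vadd acc (total row l) := by
  induction l generalizing acc with
  | nil => simp [total, vadd4_zero_right]
  | cons x l ih =>
      rw [List.foldl_cons, ih, stepSubA_eq, total, vadd4_assoc]

theorem revStepB_eq (row : List (String × Int))
    (st : PySem.Dict String (Int × Int × Int × Int) × (Int × Int × Int × Int)) (name : String) :
    revStepB row st name = (st.1.insert name st.2, vadd st.2 (contrib row name)) := by
  rcases h : subColsB.get? name with _ | ⟨carry, defect, scrap, on_hold⟩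
  · rw [revStepB, contrib, h, vadd4_zero_right]
  · cases defect <;> cases on_hold <;> simp [revStepB, contrib, vadd, h]

-- the reverse pass, cons-step characterisation
def buildB (row : List (String × Int)) (sequence : List String) :
    PySem.Dict String (Int × Int × Int × Int) × (Int × Int × Int × Int) :=
  sequence.reverse.foldl (revStepB row) (PySem.Dict.empty, (0, 0, 0, 0))

theorem buildB_cons (row : List (String × Int)) (x : String) (xs : List String) :
    buildB row (x :: xs) =
      ((buildB row xs).1.insert x (buildB row xs).2,
       vadd (buildB row xs).2 (contrib row x)) := by
  simp only [buildB, List.reverse_cons, List.foldl_append, List.foldl_cons, List.foldl_nil,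
    revStepB_eq]

theorem buildB_snd (row : List (String × Int)) (xs : List String) :
    (buildB row xs).2 = total row xs := by
  induction xs with
  | nil => rfl
  | cons x xs ih =>
      rw [buildB_cons, total, ih, vadd4_comm]

theorem buildB_get? (row : List (String × Int)) (xs : List String) (key : String) :
    (buildB row xs).1.get? key =
      (PySem.List.index? xs key).map (fun i => total row (xs.drop (i + 1))) := by
  induction xs with
  | nil => simp [buildB, PySem.List.index?_eq_idxOf?]
  | cons x xs ih =>
      rw [buildB_cons]
      by_cases hx : key = x
      · subst hx
        rw [PySem.Dict.get?_insert_self, PySem.List.index?_cons_self, buildB_snd]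
        simp
      · rw [PySem.Dict.get?_insert_of_ne _ _ hx, ih,
          PySem.List.index?_cons_of_ne _ (fun h => hx h.symm)]
        cases h : PySem.List.index? xs key <;> simp

-- A's per-key inner computation equals the suffix total
theorem subsA_eq (row : List (String × Int)) (sequence : List String) (i : Nat) :
    (PySem.List.pyRange ((i : Int) + 1) (PySem.List.len sequence) 1).foldl
      (fun acc j => stepSubA row acc (PySem.List.pyGetD sequence j "")) (0, 0, 0, 0)
    = total row (sequence.drop (i + 1)) := by
  have h1 : ((i : Int) + 1) = ((i + 1 : Nat) : Int) := by push_cast; ring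
  rw [h1, PySem.List.foldl_pyRange_pyGetD sequence "" (stepSubA row) (0, 0, 0, 0)
    (a := ((i + 1 : Nat) : Int)) (by positivity), Int.toNat_natCast,
    foldl_stepSubA, vadd4_zero_left]

-- per-key equality of the outer loop steps, with the closed per-key facts as hypotheses
theorem outerStep_eq (row : List (String × Int)) (sequence : List String) (forecast : Int)
    (key : String) {flds : List (String × String)} {aa : String}
    (hcfg : getConfigByKeyA key = some flds)
    (hca : fgetA flds "carry" = some (key ++ "_carry_over"))
    (haa : fgetA flds "actual" = some aa)
    (haane : (aa == "") = false)
    (hrep : PySem.Str.replace aa "_actual" "_actual_plan" = key ++ "_actual_plan")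
    (hde : fgetA flds "defect" = some (key ++ "_defect"))
    (hdene : ((key ++ "_defect") == "") = false)
    (hsc : fgetA flds "scrap" = some (key ++ "_scrap"))
    (hscne : ((key ++ "_scrap") == "") = false)
    (hoh : fgetA flds "onHold" = some (key ++ "_on_hold"))
    (hohne : ((key ++ "_on_hold") == "") = false)
    (updates : PySem.Dict String Int) :
    outerStepA row sequence forecast updates key =
      trendStepB row forecast (buildB row sequence).1 updates key := by
  by_cases hk : sequence.contains key
  · have hmem : key ∈ sequence := by simpa using hk
    have hsome : (PySem.List.index? sequence key).isSome :=
      (PySem.List.index?_isSome_iff _ _).mpr hmem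
    obtain ⟨i, hi⟩ := Option.isSome_iff_exists.mp hsome
    rcases htot : total row (sequence.drop (i + 1)) with ⟨c, d, s, o⟩
    have hB : (buildB row sequence).1.get? key = some (c, d, s, o) := by
      rw [buildB_get?, hi, Option.map_some, htot]
    have hsubs : (PySem.List.pyRange ((i : Int) + 1) (PySem.List.len sequence) 1).foldl
        (fun acc j => stepSubA row acc (PySem.List.pyGetD sequence j "")) (0, 0, 0, 0)
        = (c, d, s, o) := by rw [subsA_eq, htot]
    rw [outerStepA, trendStepB, hB, hk, hcfg]
    simp only [Bool.not_true, Bool.false_eq_true, if_false, if_true,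
      hca, haa, haane, hrep, hde, hdene, hsc, hscne, hoh, hohne, hi,
      Option.getD_some, Bool.false_eq_true]
    rw [if_pos (by positivity), hsubs]
  · have hmem : key ∉ sequence := by simpa using hk
    have hnone : PySem.List.index? sequence key = none :=
      (PySem.List.index?_eq_none_iff _ _).mpr hmem
    have hB : (buildB row sequence).1.get? key = none := by
      rw [buildB_get?, hnone]; rfl
    have hkf : sequence.contains key = false := by simpa using hk
    rw [outerStepA, trendStepB, hB, hkf]
    rfl

theorem compute_eq (row : List (String × Int)) (sequence : List String) :
    compute_actual_plan_trend_updates_py row sequence =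
      compute_actual_plan_trend_updates_py_alt row sequence := by
  unfold compute_actual_plan_trend_updates_py compute_actual_plan_trend_updates_py_alt
  rw [show trendPrefixesB = trendPrefixesA from rfl]
  congr 1
  apply PySem.List.foldl_congr_mem'
  intro key hkey u
  have hb : (sequence.reverse.foldl (revStepB row) (PySem.Dict.empty, (0, 0, 0, 0))).1
      = (buildB row sequence).1 := rfl
  rw [hb]
  fin_cases hkey
  · exact outerStep_eq row sequence _ "cutting" rfl rfl rfl rfl (by decide) rfl rfl rfl rfl rfl rfl u
  · exact outerStep_eq row sequence _ "chamfering" rfl rfl rfl rfl (by decide) rfl rfl rfl rfl rfl rfl u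
  · exact outerStep_eq row sequence _ "molding" rfl rfl rfl rfl (by decide) rfl rfl rfl rfl rfl rfl u
  · exact outerStep_eq row sequence _ "plating" rfl rfl rfl rfl (by decide) rfl rfl rfl rfl rfl rfl u
  · exact outerStep_eq row sequence _ "welding" rfl rfl rfl rfl (by decide) rfl rfl rfl rfl rfl rfl u
  · exact outerStep_eq row sequence _ "inspection" rfl rfl rfl rfl (by decide) rfl rfl rfl rfl rfl rfl u

-- ===== VERDICT (by name: the statement is the Claim_ definition above) =====
theorem compute_actual_plan_trend_updates_py_spec : Claim_equal_compute_actual_plan_trend_updates_py := by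
  intro row sequence _
  unfold Spec_compute_actual_plan_trend_updates_py
  exact compute_eq row sequence
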